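-- pv_equiv track=rewrite | github.com/a554b554/EAML | skills/execute/scripts/strip.py | strip_protected
-- ===== SOURCE A (Python) =====
-- def strip_protected(text, protect_open, protect_close):
--     """Replace <<text>> with text."""
--     result = []
--     i = 0
--     n = len(text)
--     po = protect_open
--     pc = protect_close
--     lo = len(po)
--     lc = len(pc)
--     while i < n:
--         if text[i:i + lo] == po:
--             # Find closing protect
--             j = i + lo
--             end = text.find(pc, j)
--             if end != -1:
--                 result.append(text[j:end])
--                 i = end + lc
--             else:
--                 result.append(text[i])
--                 i += 1
--         else:
--             result.append(text[i])
--             i += 1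
--     return ''.join(result)
-- ===== SOURCE B (Python) =====
-- def strip_protected(text, protect_open, protect_close):
--     """Replace <<text>> with text."""
--     out = []
--     i = 0
--     lo = len(protect_open)
--     lc = len(protect_close)
--     while True:
--         p = text.find(protect_open, i)
--         if p == -1:
--             out.append(text[i:])
--             break
--         e = text.find(protect_close, p + lo)
--         if e == -1:
--             out.append(text[i:])
--             break
--         out.append(text[i:p])
--         out.append(text[p + lo:e])
--         i = e + lc
--     return ''.join(out)
-- ===== Notes on version B (the rewrite author's own statement) =====
-- stated objective: faster
-- what changed: A scans character by character, testing a slice against the open delimiter at every index and appending single characters; B leapfrogs in blocks with two str.find calls per protected region, copying whole slices between matches, so the per-character Python-level loop disappears.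
-- outside the precondition, e.g. on strip_protected('', '', ''): A returns '', B does not finish within the time limit
import Mathlib
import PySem

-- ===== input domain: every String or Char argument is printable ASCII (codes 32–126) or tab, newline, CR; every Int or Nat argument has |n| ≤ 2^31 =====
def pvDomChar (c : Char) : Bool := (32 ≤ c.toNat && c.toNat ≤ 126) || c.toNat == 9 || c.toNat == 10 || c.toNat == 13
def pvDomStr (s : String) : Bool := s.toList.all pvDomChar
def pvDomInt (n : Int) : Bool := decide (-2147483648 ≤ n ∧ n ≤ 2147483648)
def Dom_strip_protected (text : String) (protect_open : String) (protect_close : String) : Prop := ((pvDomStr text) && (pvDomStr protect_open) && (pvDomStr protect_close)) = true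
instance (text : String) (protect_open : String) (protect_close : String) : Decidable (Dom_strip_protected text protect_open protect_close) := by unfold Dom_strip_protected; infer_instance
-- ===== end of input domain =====

-- B replaces A's per-character scan by block jumps with two find calls per protected
-- region (objective: faster by a constant factor; a timing run decides the label).
-- Shared helper: Python's str.find(pat, i) on the suffix starting at i, rendered as a
-- split: first suffix of s that pat is a prefix of, returned as (before, fromMatch).
def splitAtPat (pat : List Char) : List Char → Option (List Char × List Char)
  | [] => if pat = [] then some ([], []) else none
  | c :: cs =>
    if pat <+: (c :: cs) then some ([], c :: cs)
    else (splitAtPat pat cs).map (fun pr => (c :: pr.1, pr.2))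

-- ===== PORT A =====
-- A's while loop over index i, rendered on the suffix text[i:]; fuel bounds the loop
-- (Python A terminates exactly on Pre_, where fuel = length+1 is never exhausted).
def stripLoopA (po pc : List Char) : Nat → List Char → List Char
  | 0, _ => []
  | _ + 1, [] => []
  | n + 1, c :: cs =>
    if po <+: (c :: cs) then          -- text[i:i+lo] == po
      match splitAtPat pc ((c :: cs).drop po.length) with   -- end = text.find(pc, i+lo)
      | some (mid, r2) => mid ++ stripLoopA po pc n (r2.drop pc.length)  -- append text[j:end]; i = end+lc
      | none => c :: stripLoopA po pc n cs                  -- append text[i]; i += 1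
    else c :: stripLoopA po pc n cs                         -- append text[i]; i += 1

def strip_protected (text : String) (protect_open : String) (protect_close : String) : String :=
  String.ofList (stripLoopA protect_open.toList protect_close.toList (text.toList.length + 1) text.toList)

-- ===== PORT B =====
-- B's while loop: p = find(po, i); e = find(pc, p+lo); copy text[i:p] and text[p+lo:e]; i = e+lc.
def stripLoopB (po pc : List Char) : Nat → List Char → List Char
  | 0, s => s
  | n + 1, s =>
    match splitAtPat po s with                  -- p = text.find(po, i)
    | none => s                                 -- p == -1: append text[i:]
    | some (pre, rest) =>
      match splitAtPat pc (rest.drop po.length) with   -- e = text.find(pc, p+lo)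
      | none => s                               -- e == -1: append text[i:]
      | some (mid, r2) => pre ++ mid ++ stripLoopB po pc n (r2.drop pc.length)

def strip_protected_alt (text : String) (protect_open : String) (protect_close : String) : String :=
  String.ofList (stripLoopB protect_open.toList protect_close.toList (text.toList.length + 1) text.toList)

-- ===== PRECONDITION & SPEC =====
-- Pre_ excludes only the degenerate input where BOTH delimiters are empty: there
-- Python A loops forever on any nonempty text (it returns only the trivial '' on
-- empty text), and B's find-based loop never advances at all.
def Pre_strip_protected (text : String) (protect_open : String) (protect_close : String) : Prop :=
  protect_open ≠ "" ∨ protect_close ≠ ""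
instance (text : String) (protect_open : String) (protect_close : String) : Decidable (Pre_strip_protected text protect_open protect_close) := by unfold Pre_strip_protected; infer_instance

def pvWitness_strip_protected : String × String × String := ("a<<b>>c", "<<", ">>")

def Spec_strip_protected (text : String) (protect_open : String) (protect_close : String) (out : String) : Prop := out = strip_protected_alt text protect_open protect_close
instance (text : String) (protect_open : String) (protect_close : String) (out : String) : Decidable (Spec_strip_protected text protect_open protect_close out) := by unfold Spec_strip_protected; infer_instance

-- ===== CLAIM (what is proved, stated in full; the proofs are below) =====
def Claim_equal_strip_protected : Prop := ∀ (text : String) (protect_open : String) (protect_close : String), Dom_strip_protected text protect_open protect_close → Pre_strip_protected text protect_open protect_close → Spec_strip_protected text protect_open protect_close (strip_protected text protect_open protect_close)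

-- ===== LEMMAS AND PROOFS =====

lemma splitAtPat_some (pat : List Char) : ∀ (s pre rest : List Char),
    splitAtPat pat s = some (pre, rest) → s = pre ++ rest ∧ pat <+: rest := by
  intro s
  induction s with
  | nil =>
    intro pre rest h
    simp only [splitAtPat] at h
    split at h
    · rename_i hp
      cases h
      exact ⟨rfl, by simp [hp]⟩
    · cases h
  | cons c cs ih =>
    intro pre rest h
    simp only [splitAtPat] at h
    split at h
    · rename_i hp
      cases h
      exact ⟨rfl, hp⟩
    · rcases Option.map_eq_some_iff.mp h with ⟨⟨a, b⟩, hab, heq⟩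
      cases heq
      obtain ⟨h1, h2⟩ := ih a b hab
      exact ⟨by simp [h1], h2⟩

lemma splitAtPat_prefix (pat s : List Char) (h : pat <+: s) :
    splitAtPat pat s = some ([], s) := by
  cases s with
  | nil => simp only [splitAtPat]; simp [List.prefix_nil.mp h]
  | cons c cs => simp only [splitAtPat]; simp [h]

lemma splitAtPat_none_tail (pat : List Char) : ∀ s : List Char,
    splitAtPat pat s = none → splitAtPat pat (s.drop 1) = none := by
  intro s h
  cases s with
  | nil => simpa using h
  | cons c cs =>
    simp only [splitAtPat] at h
    split at h
    · cases h
    · simpa using Option.map_eq_none_iff.mp h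

-- once A's find of pc fails, A copies the rest of the text verbatim
lemma stripLoopA_copy (po pc : List Char) : ∀ (n : Nat) (s : List Char),
    s.length < n → splitAtPat pc (s.drop po.length) = none →
    stripLoopA po pc n s = s := by
  intro n
  induction n with
  | zero => intro s h; omega
  | succ m ih =>
    intro s hlen hnone
    cases s with
    | nil => simp [stripLoopA]
    | cons c cs =>
      have htail : splitAtPat pc (cs.drop po.length) = none := by
        have := splitAtPat_none_tail pc _ hnone
        rwa [List.drop_drop, List.drop_succ_cons] at this
      have hrec : stripLoopA po pc m cs = cs :=
        ih cs (by simpa using Nat.lt_of_succ_lt_succ hlen) htail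
      simp only [stripLoopA]
      split
      · rw [hnone]; simp [hrec]
      · simp [hrec]

lemma stripLoopB_succ (po pc : List Char) (n : Nat) (s : List Char) :
    stripLoopB po pc (n + 1) s =
      match splitAtPat po s with
      | none => s
      | some (pre, rest) =>
        match splitAtPat pc (rest.drop po.length) with
        | none => s
        | some (mid, r2) => pre ++ mid ++ stripLoopB po pc n (r2.drop pc.length) := rfl

lemma stripLoopA_cons (po pc : List Char) (n : Nat) (c : Char) (cs : List Char) :
    stripLoopA po pc (n + 1) (c :: cs) =
      if po <+: (c :: cs) then
        match splitAtPat pc ((c :: cs).drop po.length) with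
        | some (mid, r2) => mid ++ stripLoopA po pc n (r2.drop pc.length)
        | none => c :: stripLoopA po pc n cs
      else c :: stripLoopA po pc n cs := rfl

lemma stripLoopB_fuel (po pc : List Char) (hne : 1 ≤ po.length + pc.length) :
    ∀ (n m : Nat) (s : List Char), s.length < n → s.length < m →
    stripLoopB po pc n s = stripLoopB po pc m s := by
  intro n
  induction n with
  | zero => intro m s h; omega
  | succ n' ih =>
    intro m s hn hm
    cases m with
    | zero => omega
    | succ m' =>
      rw [stripLoopB_succ, stripLoopB_succ]
      cases hsp : splitAtPat po s with
      | none => rfl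
      | some pr =>
        obtain ⟨pre, rest⟩ := pr
        obtain ⟨hs1, hs2⟩ := splitAtPat_some po s pre rest hsp
        cases hsc : splitAtPat pc (rest.drop po.length) with
        | none => simp only [hsc]
        | some pr2 =>
          obtain ⟨mid, r2⟩ := pr2
          obtain ⟨ht1, ht2⟩ := splitAtPat_some pc _ mid r2 hsc
          have hlo : po.length ≤ rest.length := hs2.length_le
          have hlc : pc.length ≤ r2.length := ht2.length_le
          have hrest : rest.length - po.length = mid.length + r2.length := by
            have := congrArg List.length ht1
            simpa using this
          have hslen : s.length = pre.length + rest.length := by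
            have := congrArg List.length hs1
            simpa using this
          simp only [hsc]
          rw [ih m' (r2.drop pc.length) (by simp only [List.length_drop]; omega)
              (by simp only [List.length_drop]; omega)]

lemma stripLoopB_cons (po pc : List Char) (hne : 1 ≤ po.length + pc.length)
    (c : Char) (cs : List Char) (m : Nat) (hm : cs.length < m)
    (hnp : ¬ po <+: (c :: cs)) :
    stripLoopB po pc (m + 1) (c :: cs) = c :: stripLoopB po pc m cs := by
  cases m with
  | zero => omega
  | succ m' =>
    rw [stripLoopB_succ, stripLoopB_succ]
    have hsplit : splitAtPat po (c :: cs) = (splitAtPat po cs).map (fun pr => (c :: pr.1, pr.2)) := by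
      simp only [splitAtPat]
      rw [if_neg hnp]
    rw [hsplit]
    cases hsp : splitAtPat po cs with
    | none => rfl
    | some pr =>
      obtain ⟨pre, rest⟩ := pr
      obtain ⟨hs1, hs2⟩ := splitAtPat_some po cs pre rest hsp
      simp only [Option.map_some]
      cases hsc : splitAtPat pc (rest.drop po.length) with
      | none => simp only [hsc]
      | some pr2 =>
        obtain ⟨mid, r2⟩ := pr2
        obtain ⟨ht1, ht2⟩ := splitAtPat_some pc _ mid r2 hsc
        have hlo : po.length ≤ rest.length := hs2.length_le
        have hlc : pc.length ≤ r2.length := ht2.length_le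
        have hrest : rest.length - po.length = mid.length + r2.length := by
          have := congrArg List.length ht1
          simpa using this
        have hslen : cs.length = pre.length + rest.length := by
          have := congrArg List.length hs1
          simpa using this
        simp only [hsc]
        rw [stripLoopB_fuel po pc hne m' (m' + 1) (r2.drop pc.length)
            (by simp only [List.length_drop]; omega) (by simp only [List.length_drop]; omega)]
        simp

lemma stripLoop_main (po pc : List Char) (hne : 1 ≤ po.length + pc.length) :
    ∀ (n : Nat) (s : List Char) (nb : Nat), s.length < n → s.length < nb →
    stripLoopA po pc n s = stripLoopB po pc nb s := by
  intro n
  induction n with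
  | zero => intro s nb h; omega
  | succ n' ih =>
    intro s nb hn hnb
    cases nb with
    | zero => omega
    | succ nb' =>
      cases s with
      | nil =>
        rw [stripLoopB_succ]
        by_cases hpo : po = []
        · have hpc : pc ≠ [] := by
            intro h; rw [hpo, h] at hne; simp at hne
          subst hpo
          have h1 : splitAtPat ([] : List Char) ([] : List Char) = some ([], []) := by
            simp [splitAtPat]
          have h2 : splitAtPat pc ((([] : List Char)).drop (List.length ([] : List Char))) = none := by
            simp [splitAtPat, hpc]
          rw [h1]
          simp only [h2]
          simp [stripLoopA]
        · have h1 : splitAtPat po ([] : List Char) = none := by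
            simp [splitAtPat, hpo]
          rw [h1]
          simp [stripLoopA]
      | cons c cs =>
        rw [stripLoopA_cons]
        by_cases hp : po <+: (c :: cs)
        · have hsp : splitAtPat po (c :: cs) = some ([], c :: cs) :=
            splitAtPat_prefix po _ hp
          rw [if_pos hp, stripLoopB_succ, hsp]
          cases hsc : splitAtPat pc ((c :: cs).drop po.length) with
          | none =>
            have htail : splitAtPat pc (cs.drop po.length) = none := by
              have := splitAtPat_none_tail pc _ hsc
              rwa [List.drop_drop, List.drop_succ_cons] at this
            have hcopy : stripLoopA po pc n' cs = cs :=
              stripLoopA_copy po pc n' cs (by simpa using Nat.lt_of_succ_lt_succ hn) htail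
            simp [hsc, hcopy]
          | some pr2 =>
            obtain ⟨mid, r2⟩ := pr2
            obtain ⟨ht1, ht2⟩ := splitAtPat_some pc _ mid r2 hsc
            have hlo : po.length ≤ (c :: cs).length := hp.length_le
            have hlc : pc.length ≤ r2.length := ht2.length_le
            have hrest : (c :: cs).length - po.length = mid.length + r2.length := by
              have := congrArg List.length ht1
              simpa using this
            have harg : (r2.drop pc.length).length < (c :: cs).length := by
              simp only [List.length_drop]
              simp only [List.length_cons] at hrest ⊢
              omega
            have hrec := ih (r2.drop pc.length) nb'
              (by simp only [List.length_cons] at hn harg ⊢; omega)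
              (by simp only [List.length_cons] at hnb harg ⊢; omega)
            simp [hsc, hrec]
        · have hrec := ih cs nb' (by simpa using Nat.lt_of_succ_lt_succ hn)
            (by simpa using Nat.lt_of_succ_lt_succ hnb)
          rw [stripLoopB_cons po pc hne c cs nb' (by simpa using Nat.lt_of_succ_lt_succ hnb) hp]
          rw [if_neg hp]
          simp [hrec]

lemma toList_ne_nil_of_ne_empty (s : String) (h : s ≠ "") : s.toList ≠ [] := by
  intro hnil
  exact h (by simpa using congrArg String.ofList hnil)

-- ===== VERDICT (by name: the statement is the Claim_ definition above) =====
theorem strip_protected_spec : Claim_equal_strip_protected := by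
  intro text po pc _ hpre
  unfold Spec_strip_protected strip_protected strip_protected_alt
  congr 1
  apply stripLoop_main
  · rcases hpre with h | h
    · have := toList_ne_nil_of_ne_empty po h
      have : 1 ≤ po.toList.length := by
        cases hh : po.toList <;> simp_all
      omega
    · have := toList_ne_nil_of_ne_empty pc h
      have : 1 ≤ pc.toList.length := by
        cases hh : pc.toList <;> simp_all
      omega
  · omega
  · omega
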